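-- pv_equiv track=rewrite | github.com/corepresentable/ruin_poetry | rhymeFrame.py | rhymingPart
-- ===== SOURCE A (Python) =====
-- def rhymingPart(phones):
-- 	idx = 0
-- 	phones_list = phones.split()
-- 	for i in reversed(range(0,len(phones_list))):
-- 		if phones_list[i][-1] in ('1','2'):
-- 			idx = i
-- 			break
-- 	rp =  ' '.join(i if not i[-1].isdigit() else i[0:len(i)-1] for i in phones_list[idx:])
-- 	return rp
-- ===== SOURCE B (Python) =====
-- def rhymingPart(phones):
--     buf = []
--     for p in phones.split():
--         if p[-1] in ('1', '2'):
--             buf = [p[:-1]]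
--         else:
--             buf.append(p[:-1] if p[-1].isdigit() else p)
--     return ' '.join(buf)
-- ===== Notes on version B (the rewrite author's own statement) =====
-- stated objective: alternative
-- what changed: Replaced the backward index search plus slice-and-join with a single forward pass that resets a buffer at each stressed phoneme and strips trailing digits as it goes.
import Mathlib
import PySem

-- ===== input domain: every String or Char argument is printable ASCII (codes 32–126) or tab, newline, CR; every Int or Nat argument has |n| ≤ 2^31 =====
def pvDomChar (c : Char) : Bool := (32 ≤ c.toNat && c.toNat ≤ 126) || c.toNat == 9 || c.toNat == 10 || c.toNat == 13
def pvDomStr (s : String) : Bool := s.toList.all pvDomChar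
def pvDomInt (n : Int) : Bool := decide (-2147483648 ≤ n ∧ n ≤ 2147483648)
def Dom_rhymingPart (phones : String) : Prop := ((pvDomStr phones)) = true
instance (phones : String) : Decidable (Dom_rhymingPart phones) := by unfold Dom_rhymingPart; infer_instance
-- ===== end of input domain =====

-- B replaces A's backward index search + slice-and-join by one forward pass with a reset buffer; same return value, no side effects.

-- ===== PORT A =====
-- 'i if not i[-1].isdigit() else i[0:len(i)-1]'
def pvStripTok (t : List Char) : List Char :=
  match PySem.List.pyGet? t (-1) with
  | some c => if !(PySem.Chars.isdigit c) then t
              else PySem.List.slice t (some 0) (some ((t.length : Int) - 1))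
  | none => t  -- unreachable: split() yields no empty token (Python would raise IndexError)

-- "phones_list[i][-1] in ('1','2')"
def pvStressed (t : List Char) : Bool :=
  match PySem.List.pyGet? t (-1) with
  | some c => c == '1' || c == '2'
  | none => false  -- unreachable for split() tokens

-- the 'for i in reversed(range(0,len(phones_list)))' loop with its break; idx starts at 0
def pvFindIdx (pl : List (List Char)) : List Nat → Nat
  | [] => 0
  | i :: rest =>
      if pvStressed ((PySem.List.pyGet? pl (i : Int)).getD []) then i
      else pvFindIdx pl rest

def rhymingPart (phones : String) : String :=
  let pl := PySem.Chars.split₀ phones.toList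
  let idx := pvFindIdx pl (List.range pl.length).reverse
  String.mk (PySem.Chars.join [' ']
    ((PySem.List.slice pl (some (idx : Int)) none).map pvStripTok))

-- ===== PORT B =====
-- loop body: reset buffer at a stressed phoneme, else append (stripping a trailing digit)
def pvStepB (buf : List (List Char)) (t : List Char) : List (List Char) :=
  match PySem.List.pyGet? t (-1) with
  | some c =>
      if c == '1' || c == '2' then [PySem.List.slice t none (some (-1))]
      else buf ++ [if PySem.Chars.isdigit c then PySem.List.slice t none (some (-1)) else t]
  | none => buf ++ [t]  -- unreachable for split() tokens

def rhymingPart_alt (phones : String) : String :=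
  String.mk (PySem.Chars.join [' ']
    ((PySem.Chars.split₀ phones.toList).foldl pvStepB []))

-- ===== PRECONDITION & SPEC =====
def Spec_rhymingPart (phones : String) (out : String) : Prop := out = rhymingPart_alt phones
instance (phones : String) (out : String) : Decidable (Spec_rhymingPart phones out) := by unfold Spec_rhymingPart; infer_instance

-- ===== CLAIM (what is proved, stated in full; the proofs are below) =====
def Claim_equal_rhymingPart : Prop := ∀ (phones : String), Dom_rhymingPart phones → Spec_rhymingPart phones (rhymingPart phones)

-- ===== LEMMAS AND PROOFS =====

-- tokens of split() are never empty
lemma pv_go_ne_nil (s : List Char) : ∀ (cur : List Char) (acc : List (List Char)),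
    (∀ a ∈ acc, a ≠ []) → ∀ t ∈ PySem.Chars.split₀.go s cur acc, t ≠ [] := by
  induction s with
  | nil =>
      intro cur acc hacc t ht
      simp only [PySem.Chars.split₀.go] at ht
      by_cases hcur : cur.isEmpty = true
      · rw [if_pos hcur] at ht
        exact hacc t (List.mem_reverse.mp ht)
      · rw [if_neg hcur] at ht
        rcases List.mem_cons.mp (List.mem_reverse.mp ht) with h | h
        · subst h
          intro hnil
          exact hcur (List.isEmpty_iff.mpr (List.reverse_eq_nil_iff.mp hnil))
        · exact hacc t h
  | cons c rest ih =>
      intro cur acc hacc t ht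
      simp only [PySem.Chars.split₀.go] at ht
      by_cases hsp : PySem.Chars.isspace c = true
      · rw [if_pos hsp] at ht
        by_cases hcur : cur.isEmpty = true
        · rw [if_pos hcur] at ht
          exact ih [] acc hacc t ht
        · rw [if_neg hcur] at ht
          refine ih [] (cur.reverse :: acc) ?_ t ht
          intro a ha
          rcases List.mem_cons.mp ha with rfl | ha
          · intro hnil
            exact hcur (List.isEmpty_iff.mpr (List.reverse_eq_nil_iff.mp hnil))
          · exact hacc a ha
      · rw [if_neg hsp] at ht
        exact ih (c :: cur) acc hacc t ht

lemma pv_split₀_ne_nil (s : List Char) : ∀ t ∈ PySem.Chars.split₀ s, t ≠ [] := by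
  intro t ht
  exact pv_go_ne_nil s [] [] (by simp) t ht

-- the two slices both strip exactly the last character
lemma pv_slice_neg_one (t : List Char) :
    PySem.List.slice t none (some (-1)) = List.take (t.length - 1) t := by
  simp [PySem.List.slice]

lemma pv_slice_len_sub_one (t : List Char) (h : t ≠ []) :
    PySem.List.slice t (some 0) (some ((t.length : Int) - 1)) = List.take (t.length - 1) t := by
  have hp : 0 < t.length := List.length_pos_iff.mpr h
  have h1 : ((t.length : Int) - 1) = ((t.length - 1 : Nat) : Int) := by omega
  have h0 : ((0 : Int)) = ((0 : Nat) : Int) := rfl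
  rw [h1, h0, PySem.List.slice_natCast]
  simp

lemma pv_step_eq (buf : List (List Char)) (t : List Char) (h : t ≠ []) :
    pvStepB buf t = if pvStressed t then [pvStripTok t] else buf ++ [pvStripTok t] := by
  obtain ⟨c, hc⟩ : ∃ c, PySem.List.pyGet? t (-1) = some c := by
    rcases t.eq_nil_or_concat with rfl | ⟨ys, y, rfl⟩
    · exact absurd rfl h
    · exact ⟨y, by simp⟩
  unfold pvStepB pvStressed pvStripTok
  rw [hc]
  by_cases hs : (c == '1' || c == '2') = true
  · have hd : PySem.Chars.isdigit c = true := by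
      rcases Bool.or_eq_true_iff.mp hs with h1 | h1 <;>
        simp_all [PySem.Chars.isdigit, beq_iff_eq]
    simp [hs, hd, pv_slice_neg_one, pv_slice_len_sub_one t h]
  · by_cases hd : PySem.Chars.isdigit c = true <;>
      simp [hs, hd, pv_slice_neg_one, pv_slice_len_sub_one t h]

lemma pvFindIdx_congr (pl1 pl2 : List (List Char)) (is : List Nat)
    (h : ∀ i ∈ is, PySem.List.pyGet? pl2 (i : Int) = PySem.List.pyGet? pl1 (i : Int)) :
    pvFindIdx pl2 is = pvFindIdx pl1 is := by
  induction is with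
  | nil => rfl
  | cons i rest ih =>
      simp only [pvFindIdx, h i (by simp)]
      split
      · rfl
      · exact ih fun j hj => h j (by simp [hj])

lemma pvFindIdx_le (pl : List (List Char)) (is : List Nat) (n : Nat)
    (h : ∀ i ∈ is, i ≤ n) : pvFindIdx pl is ≤ n := by
  induction is with
  | nil => simp [pvFindIdx]
  | cons i rest ih =>
      simp only [pvFindIdx]
      split
      · exact h i (by simp)
      · exact ih fun j hj => h j (by simp [hj])

-- the forward pass computes exactly A's stripped suffix
lemma pv_fold (pl : List (List Char)) (hne : ∀ t ∈ pl, t ≠ []) :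
    pl.foldl pvStepB []
      = (pl.drop (pvFindIdx pl (List.range pl.length).reverse)).map pvStripTok := by
  induction pl using List.reverseRecOn with
  | nil => rfl
  | append_singleton pl t ih =>
      have hts : t ≠ [] := hne t (by simp)
      have hpl : ∀ u ∈ pl, u ≠ [] := fun u hu => hne u (by simp [hu])
      have hrange : (List.range (pl ++ [t]).length).reverse
          = pl.length :: (List.range pl.length).reverse := by
        simp [List.range_succ]
      have hget : PySem.List.pyGet? (pl ++ [t]) ((pl.length : Nat) : Int) = some t :=
        PySem.List.pyGet?_append_length pl [] t
      rw [List.foldl_append, ih hpl, hrange]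
      simp only [pvFindIdx, hget, Option.getD_some]
      by_cases hs : pvStressed t = true
      · simp only [List.foldl_cons, List.foldl_nil, pv_step_eq _ t hts]
        simp [hs, List.drop_append_of_le_length (Nat.le_refl pl.length)]
      · have hcongr : pvFindIdx (pl ++ [t]) (List.range pl.length).reverse
            = pvFindIdx pl (List.range pl.length).reverse := by
          refine pvFindIdx_congr _ _ _ fun i hi => ?_
          have hilt : i < pl.length := by
            have := List.mem_reverse.mp hi; simpa [List.mem_range] using this
          rw [PySem.List.pyGet?_natCast, PySem.List.pyGet?_natCast,
            List.getElem?_append_left hilt]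
        have hle : pvFindIdx pl (List.range pl.length).reverse ≤ pl.length := by
          refine pvFindIdx_le _ _ _ fun i hi => ?_
          have := List.mem_reverse.mp hi
          have := List.mem_range.mp this
          omega
        simp only [List.foldl_cons, List.foldl_nil, pv_step_eq _ t hts]
        simp only [hs, if_false, Bool.false_eq_true, hcongr,
          List.drop_append_of_le_length hle, List.map_append]
        simp

-- ===== VERDICT (by name: the statement is the Claim_ definition above) =====
theorem rhymingPart_spec : Claim_equal_rhymingPart := by
  intro phones _
  unfold Spec_rhymingPart
  have hne := pv_split₀_ne_nil phones.toList
  simp only [rhymingPart, rhymingPart_alt]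
  rw [pv_fold _ hne, PySem.List.slice_from _ (Int.natCast_nonneg _)]
  simp
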